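-- pv_equiv track=rewrite | github.com/gibsramen/spaced-motif-finding | spaced-motif-finding/alignment.py | align_strings
-- ===== SOURCE A (Python) =====
-- def create_empty_matrix(y, x):
--     """Initialize and return an empty array of y rows by x columns."""
--     row = [0 for i in range(x)]
--     empty_mat = []
--     for i in range(y): empty_mat.append(row[:])
--     return(empty_mat)
--
-- def create_scoring_dict():
--     """Create dictionary to hold alignment scores."""
--     alphabet = 'ACTG'
--     score_dict = {}
--     for nucl in alphabet:
--         for nucl2 in alphabet:
--             score_dict['%s%s' % (nucl, nucl2)] = int(nucl == nucl2)
--     return(score_dict)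
--
-- def align_strings(p, q):
--     """Create the alignment graph and backtrack matrix of p and q.
--
--     p is the vertical string (rows)
--     q is the horizontal string (columns)
--     """
--     score_dict = create_scoring_dict()
--     backtrack_matrix = create_empty_matrix(len(p)+1, len(q)+1)
--     alignment_matrix = create_empty_matrix(len(p)+1, len(q)+1)
--
--     for x in range(1, len(q)+1):
--         for y in range(1, len(p)+1):
--             p_char = p[y-1]
--             q_char = q[x-1]
--
--             align_score = score_dict.get('%s%s' % (p_char, q_char))
--             alignment_matrix[y][x] = alignment_matrix[y-1][x-1] + align_score
--     return(alignment_matrix)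
-- ===== SOURCE B (Python) =====
-- def create_empty_matrix(y, x):
--     """Initialize and return an empty array of y rows by x columns."""
--     row = [0 for i in range(x)]
--     empty_mat = []
--     for i in range(y): empty_mat.append(row[:])
--     return(empty_mat)
--
-- def create_scoring_dict():
--     """Create dictionary to hold alignment scores."""
--     alphabet = 'ACTG'
--     score_dict = {}
--     for nucl in alphabet:
--         for nucl2 in alphabet:
--             score_dict['%s%s' % (nucl, nucl2)] = int(nucl == nucl2)
--     return(score_dict)
--
-- def align_strings(p, q):
--     """Create the alignment graph of p and q, filled diagonal by diagonal.
--
--     p is the vertical string (rows)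
--     q is the horizontal string (columns)
--     """
--     score_dict = create_scoring_dict()
--     alignment_matrix = create_empty_matrix(len(p)+1, len(q)+1)
--
--     starts = [(1, x) for x in range(1, len(q)+1)]
--     starts += [(y, 1) for y in range(2, len(p)+1)]
--     for y0, x0 in starts:
--         acc = 0
--         y, x = y0, x0
--         while y <= len(p) and x <= len(q):
--             acc = acc + score_dict.get('%s%s' % (p[y-1], q[x-1]))
--             alignment_matrix[y][x] = acc
--             y += 1
--             x += 1
--     return(alignment_matrix)
-- ===== Notes on version B (the rewrite author's own statement) =====
-- stated objective: alternative
-- what changed: Replaces the column-major nested x/y loop (each cell read from the previous column) by an anti-diagonal sweep: for every start cell on the top row or left column one walk goes down-right carrying a running accumulator, so each cell is a pure running sum and the matrix is never read back.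
import Mathlib
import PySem

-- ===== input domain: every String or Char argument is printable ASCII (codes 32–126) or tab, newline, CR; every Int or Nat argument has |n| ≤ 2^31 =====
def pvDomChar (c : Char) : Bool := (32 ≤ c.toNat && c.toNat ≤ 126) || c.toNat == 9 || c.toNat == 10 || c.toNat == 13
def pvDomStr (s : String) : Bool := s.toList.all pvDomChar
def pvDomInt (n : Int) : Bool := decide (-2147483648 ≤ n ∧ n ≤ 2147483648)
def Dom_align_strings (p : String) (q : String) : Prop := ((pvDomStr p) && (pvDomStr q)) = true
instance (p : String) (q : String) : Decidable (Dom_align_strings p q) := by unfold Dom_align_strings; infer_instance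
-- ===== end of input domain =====

-- B fills the alignment matrix by anti-diagonal walks carrying a running accumulator instead of
-- A's column-major nested loop that reads the matrix back; same values, same cost (objective: alternative).

-- ===== PORT A =====
def create_empty_matrix (y : Int) (x : Int) : List (List Int) :=
  let row : List Int := (PySem.List.pyRange 0 x 1).map (fun _ => 0)
  (PySem.List.pyRange 0 y 1).foldl (fun empty_mat _ => empty_mat ++ [row]) []

def create_scoring_dict : PySem.Dict String Int :=
  ("ACTG".toList).foldl (fun score_dict nucl =>
    ("ACTG".toList).foldl (fun score_dict nucl2 =>
      score_dict.insert (String.ofList [nucl, nucl2]) (if nucl == nucl2 then 1 else 0))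
      score_dict)
    PySem.Dict.empty

def align_strings (p : String) (q : String) : List (List Int) :=
  let score_dict := create_scoring_dict
  let _backtrack_matrix := create_empty_matrix (PySem.Str.len p + 1) (PySem.Str.len q + 1)
  let alignment_matrix := create_empty_matrix (PySem.Str.len p + 1) (PySem.Str.len q + 1)
  (PySem.List.pyRange 1 (PySem.Str.len q + 1) 1).foldl (fun alignment_matrix x =>
    (PySem.List.pyRange 1 (PySem.Str.len p + 1) 1).foldl (fun alignment_matrix y =>
      -- p[y-1] / q[x-1]: indices provably in range, so the default of getD is never used
      let p_char : Char := (PySem.Str.pyGet? p (y - 1)).getD 'A'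
      let q_char : Char := (PySem.Str.pyGet? q (x - 1)).getD 'A'
      -- score_dict.get(...) is None outside 'ACTG' and Python then raises TypeError on +;
      -- those inputs are excluded by Pre_, so the 0 default is never used inside Pre_
      let align_score : Int := (score_dict.get? (String.ofList [p_char, q_char])).getD 0
      PySem.List.pySetD alignment_matrix y
        (PySem.List.pySetD (PySem.List.pyGetD alignment_matrix y []) x
          (PySem.List.pyGetD (PySem.List.pyGetD alignment_matrix (y - 1) []) (x - 1) 0 + align_score)))
      alignment_matrix)
    alignment_matrix

-- ===== PORT B =====
-- the while-loop of Source B: walk down-right from (y, x) adding the match score into acc and storing it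
def diag_walk (p : String) (q : String) (score_dict : PySem.Dict String Int)
    (acc : Int) (y : Int) (x : Int) (m : List (List Int)) : List (List Int) :=
  if h : y ≤ PySem.Str.len p ∧ x ≤ PySem.Str.len q then
    let acc' := acc + (score_dict.get? (String.ofList
      [(PySem.Str.pyGet? p (y - 1)).getD 'A', (PySem.Str.pyGet? q (x - 1)).getD 'A'])).getD 0
    diag_walk p q score_dict acc' (y + 1) (x + 1)
      (PySem.List.pySetD m y (PySem.List.pySetD (PySem.List.pyGetD m y []) x acc'))
  else m
termination_by (PySem.Str.len p + 1 - y).toNat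
decreasing_by simp only [PySem.Str.len_eq] at h ⊢; omega

def align_strings_alt (p : String) (q : String) : List (List Int) :=
  let score_dict := create_scoring_dict
  let alignment_matrix := create_empty_matrix (PySem.Str.len p + 1) (PySem.Str.len q + 1)
  let starts := (PySem.List.pyRange 1 (PySem.Str.len q + 1) 1).map (fun x => ((1 : Int), x))
    ++ (PySem.List.pyRange 2 (PySem.Str.len p + 1) 1).map (fun y => (y, (1 : Int)))
  starts.foldl (fun m s => diag_walk p q score_dict 0 s.1 s.2 m) alignment_matrix

-- ===== PRECONDITION & SPEC =====
-- Pre_ excludes exactly the inputs on which A raises TypeError: both strings non-empty and some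
-- character outside 'ACTG' (dict .get returns None, then None + int raises). B raises there too.
def Pre_align_strings (p : String) (q : String) : Prop :=
  p = "" ∨ q = "" ∨
    (p.toList.all (fun c => c ∈ (['A', 'C', 'T', 'G'] : List Char)) = true ∧
     q.toList.all (fun c => c ∈ (['A', 'C', 'T', 'G'] : List Char)) = true)
instance (p : String) (q : String) : Decidable (Pre_align_strings p q) := by
  unfold Pre_align_strings; infer_instance

def pvWitness_align_strings : String × String := ("AC", "GA")

def Spec_align_strings (p : String) (q : String) (out : List (List Int)) : Prop := out = align_strings_alt p q
instance (p : String) (q : String) (out : List (List Int)) : Decidable (Spec_align_strings p q out) := by unfold Spec_align_strings; infer_instance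

-- ===== CLAIM (what is proved, stated in full; the proofs are below) =====
def Claim_equal_align_strings : Prop := ∀ (p : String) (q : String), Dom_align_strings p q → Pre_align_strings p q → Spec_align_strings p q (align_strings p q)

-- ===== LEMMAS AND PROOFS =====

-- score of pairing p[i] with q[j] (0-based), exactly the expression both ports compute
def pvSAt (p q : String) (i j : Nat) : Int :=
  (create_scoring_dict.get? (String.ofList [(PySem.Str.pyGet? p (i : Int)).getD 'A',
    (PySem.Str.pyGet? q (j : Int)).getD 'A'])).getD 0

-- the diagonal recurrence both programs compute: cell (y,x) of the alignment matrix
def pvCellF (s : Nat → Nat → Int) : Nat → Nat → Int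
  | 0, _ => 0
  | _ + 1, 0 => 0
  | y + 1, x + 1 => pvCellF s y x + s y x

def pvG (M : List (List Int)) (y x : Nat) : Int := (M.getD y []).getD x 0
def pvSetG (M : List (List Int)) (y x : Nat) (v : Int) : List (List Int) :=
  M.set y ((M.getD y []).set x v)
def pvShape (n m : Nat) (M : List (List Int)) : Prop :=
  M.length = n + 1 ∧ ∀ r ∈ M, r.length = m + 1

def pvMF (s : Nat → Nat → Int) (n m : Nat) : List (List Int) :=
  (List.range (n + 1)).map (fun y => (List.range (m + 1)).map (fun x => pvCellF s y x))

lemma pvShape_setG {n m : Nat} {M : List (List Int)} (h : pvShape n m M) {y : Nat} (hy : y ≤ n)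
    (x : Nat) (v : Int) : pvShape n m (pvSetG M y x v) := by
  have h1 := h.1
  have hylt : y < M.length := by omega
  refine ⟨by simpa [pvSetG] using h.1, ?_⟩
  intro r hr
  rcases List.mem_or_eq_of_mem_set hr with hr' | rfl
  · exact h.2 r hr'
  · rw [List.getD_eq_getElem _ _ hylt, List.length_set]
    exact h.2 _ (List.getElem_mem _)

lemma pvG_setG {n m : Nat} {M : List (List Int)} (h : pvShape n m M)
    {y x : Nat} (hy : y ≤ n) (hx : x ≤ m) (v : Int) (y' x' : Nat) :
    pvG (pvSetG M y x v) y' x' = if y' = y ∧ x' = x then v else pvG M y' x' := by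
  have h1 := h.1
  have hylt : y < M.length := by omega
  have hxlt : x < (M.getD y []).length := by
    rw [List.getD_eq_getElem _ _ hylt]
    have := h.2 _ (List.getElem_mem hylt)
    omega
  by_cases hyy : y' = y
  · have hrow : (pvSetG M y x v).getD y' [] = (M.getD y []).set x v := by
      rw [hyy]
      simp [pvSetG, List.getD, hylt]
    by_cases hxx : x' = x
    · rw [pvG, hrow, hxx, if_pos ⟨hyy, rfl⟩, List.getD_eq_getElem _ _ (by simpa using hxlt)]
      simp
    · rw [pvG, hrow, if_neg (by tauto), pvG, hyy]
      simp [List.getD, List.getElem?_set_ne (Ne.symm hxx)]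
  · have hrow : (pvSetG M y x v).getD y' [] = M.getD y' [] := by
      simp [pvSetG, List.getD, List.getElem?_set_ne (Ne.symm hyy)]
    rw [pvG, hrow, if_neg (by tauto), pvG]

lemma pvEmpty_eq (n m : Nat) :
    create_empty_matrix ((n : Int) + 1) ((m : Int) + 1) =
      List.replicate (n + 1) (List.replicate (m + 1) (0 : Int)) := by
  have h1 : ((n : Int) + 1 - 0).toNat = n + 1 := by omega
  have h2 : ((m : Int) + 1 - 0).toNat = m + 1 := by omega
  simp only [create_empty_matrix, PySem.List.pyRange_one, h1, h2,
    PySem.List.foldl_append_singleton_eq_map]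
  simp [Function.comp_def, List.map_const']

lemma pvShape_M0 (n m : Nat) : pvShape n m (List.replicate (n + 1) (List.replicate (m + 1) (0 : Int))) := by
  refine ⟨by simp, ?_⟩
  intro r hr
  rw [List.eq_of_mem_replicate hr]
  simp

lemma pvG_M0 (n m y x : Nat) : pvG (List.replicate (n + 1) (List.replicate (m + 1) (0 : Int))) y x = 0 := by
  simp only [pvG, List.getD, List.getElem?_replicate]
  split_ifs <;> simp

lemma pvCellF_zero_left (s : Nat → Nat → Int) (x : Nat) : pvCellF s 0 x = 0 := by
  cases x <;> rfl

lemma pvCellF_zero_right (s : Nat → Nat → Int) (y : Nat) : pvCellF s y 0 = 0 := by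
  cases y <;> rfl

lemma pvMF_eq_of {s : Nat → Nat → Int} {n m : Nat} {M : List (List Int)}
    (hs : pvShape n m M) (hG : ∀ y ≤ n, ∀ x ≤ m, pvG M y x = pvCellF s y x) :
    M = pvMF s n m := by
  apply List.ext_getElem
  · simp [pvMF, hs.1]
  intro y hy1 hy2
  have hyn : y ≤ n := by have := hs.1; omega
  have hrowlen : M[y].length = m + 1 := hs.2 _ (List.getElem_mem hy1)
  apply List.ext_getElem
  · simp [pvMF, hrowlen]
  intro x hx1 hx2
  have hxm : x ≤ m := by omega
  have := hG y hyn x hxm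
  rw [pvG, List.getD_eq_getElem _ _ hy1, List.getD_eq_getElem _ _ hx1] at this
  simp [pvMF, this]

-- ---- A side ----
def pvValA (s : Nat → Nat → Int) (j i y x : Nat) : Int :=
  if x ≤ j ∨ (x = j + 1 ∧ y ≤ i) then pvCellF s y x else 0

def pvInnerA (s : Nat → Nat → Int) (j i : Nat) (M : List (List Int)) : List (List Int) :=
  (List.range i).foldl (fun M k => pvSetG M (1 + k) (1 + j) (pvG M k j + s k j)) M

lemma pvInnerA_spec (s : Nat → Nat → Int) (n m j : Nat) (hj : j < m) :
    ∀ i ≤ n, ∀ M, pvShape n m M →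
      (∀ y ≤ n, ∀ x ≤ m, pvG M y x = pvValA s j 0 y x) →
      pvShape n m (pvInnerA s j i M) ∧
      ∀ y ≤ n, ∀ x ≤ m, pvG (pvInnerA s j i M) y x = pvValA s j i y x := by
  intro i
  induction i with
  | zero =>
    intro _ M hS hG
    exact ⟨hS, by simpa [pvInnerA] using hG⟩
  | succ i ih =>
    intro hi M hS hG
    have hi' : i ≤ n := by omega
    obtain ⟨hS', hG'⟩ := ih hi' M hS hG
    have hstep : pvInnerA s j (i + 1) M = pvSetG (pvInnerA s j i M) (1 + i) (1 + j)
        (pvG (pvInnerA s j i M) i j + s i j) := by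
      simp [pvInnerA, List.range_succ]
    rw [hstep]
    have h1i : 1 + i ≤ n := by omega
    have h1j : 1 + j ≤ m := by omega
    refine ⟨pvShape_setG hS' h1i _ _, ?_⟩
    intro y hy x hx
    rw [pvG_setG hS' h1i h1j]
    have hread : pvG (pvInnerA s j i M) i j = pvCellF s i j := by
      rw [hG' i hi' j (le_of_lt hj), pvValA, if_pos (Or.inl le_rfl)]
    by_cases hc : y = 1 + i ∧ x = 1 + j
    · rw [if_pos hc, hread, hc.1, hc.2, pvValA, if_pos (by omega)]
      have e1 : 1 + i = i + 1 := by omega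
      have e2 : 1 + j = j + 1 := by omega
      rw [e1, e2]
      rfl
    · rw [if_neg hc, hG' y hy x hx, pvValA, pvValA]
      have hiff : (x ≤ j ∨ (x = j + 1 ∧ y ≤ i)) ↔ (x ≤ j ∨ (x = j + 1 ∧ y ≤ i + 1)) := by omega
      simp only [hiff]

def pvOuterA (s : Nat → Nat → Int) (n j : Nat) (M : List (List Int)) : List (List Int) :=
  (List.range j).foldl (fun M j' => pvInnerA s j' n M) M

lemma pvOuterA_spec (s : Nat → Nat → Int) (n m : Nat) :
    ∀ j ≤ m, pvShape n m (pvOuterA s n j (List.replicate (n + 1) (List.replicate (m + 1) (0 : Int)))) ∧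
      ∀ y ≤ n, ∀ x ≤ m,
        pvG (pvOuterA s n j (List.replicate (n + 1) (List.replicate (m + 1) (0 : Int)))) y x =
          if x ≤ j then pvCellF s y x else 0 := by
  intro j
  induction j with
  | zero =>
    intro _
    refine ⟨by simpa [pvOuterA] using pvShape_M0 n m, ?_⟩
    intro y hy x hx
    simp only [pvOuterA, List.range_zero, List.foldl_nil, pvG_M0]
    split_ifs with h
    · have hx0 : x = 0 := by omega
      rw [hx0, pvCellF_zero_right]
    · rfl
  | succ j ih =>
    intro hj
    have hj' : j ≤ m := by omega
    obtain ⟨hS, hG⟩ := ih hj'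
    have hstep : pvOuterA s n (j + 1) (List.replicate (n + 1) (List.replicate (m + 1) (0 : Int))) =
        pvInnerA s j n (pvOuterA s n j (List.replicate (n + 1) (List.replicate (m + 1) (0 : Int)))) := by
      simp [pvOuterA, List.range_succ]
    rw [hstep]
    have hhyp : ∀ y ≤ n, ∀ x ≤ m,
        pvG (pvOuterA s n j (List.replicate (n + 1) (List.replicate (m + 1) (0 : Int)))) y x =
          pvValA s j 0 y x := by
      intro y hy x hx
      rw [hG y hy x hx, pvValA]
      by_cases h1 : x ≤ j
      · rw [if_pos h1, if_pos (Or.inl h1)]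
      · rw [if_neg h1]
        by_cases h2 : x = j + 1 ∧ y ≤ 0
        · rw [if_pos (Or.inr h2)]
          have hy0 : y = 0 := by omega
          rw [hy0, pvCellF_zero_left]
        · rw [if_neg (by tauto)]
    obtain ⟨hS', hG'⟩ := pvInnerA_spec s n m j (by omega) n le_rfl _ hS hhyp
    refine ⟨hS', ?_⟩
    intro y hy x hx
    rw [hG' y hy x hx, pvValA]
    have hiff : (x ≤ j ∨ (x = j + 1 ∧ y ≤ n)) ↔ x ≤ j + 1 := by omega
    simp only [hiff]

lemma portA_eq (p q : String) :
    align_strings p q = pvOuterA (pvSAt p q) p.toList.length q.toList.length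
      (List.replicate (p.toList.length + 1) (List.replicate (q.toList.length + 1) (0 : Int))) := by
  have hlp : PySem.Str.len p = ((p.toList.length : Nat) : Int) := by simp
  have hlq : PySem.Str.len q = ((q.toList.length : Nat) : Int) := by simp
  unfold align_strings
  rw [hlp, hlq, pvEmpty_eq]
  simp only [PySem.List.pyRange_one, add_sub_cancel_right, Int.toNat_natCast, List.foldl_map]
  unfold pvOuterA pvInnerA
  congr 1
  funext M k
  congr 1
  funext M' k'
  have e1 : (1 : Int) + (k' : Int) = ((1 + k' : Nat) : Int) := by omega
  have e2 : (1 : Int) + (k : Int) = ((1 + k : Nat) : Int) := by omega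
  have e3 : (1 : Int) + (k' : Int) - 1 = ((k' : Nat) : Int) := by omega
  have e4 : (1 : Int) + (k : Int) - 1 = ((k : Nat) : Int) := by omega
  simp only [e3, e4]
  rw [e1, e2]
  simp only [PySem.List.pySetD_natCast, PySem.List.pyGetD_natCast]
  rfl

-- ---- B side ----
lemma pvWalk_spec (p q : String) :
    ∀ fuel, ∀ yn xn : Nat, ∀ M, p.toList.length + 1 - yn ≤ fuel → 1 ≤ yn → 1 ≤ xn →
      pvShape p.toList.length q.toList.length M →
      pvShape p.toList.length q.toList.length
        (diag_walk p q create_scoring_dict (pvCellF (pvSAt p q) (yn - 1) (xn - 1)) (yn : Int) (xn : Int) M) ∧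
      ∀ y ≤ p.toList.length, ∀ x ≤ q.toList.length,
        pvG (diag_walk p q create_scoring_dict (pvCellF (pvSAt p q) (yn - 1) (xn - 1)) (yn : Int) (xn : Int) M) y x =
          if yn ≤ y ∧ xn ≤ x ∧ y - yn = x - xn then pvCellF (pvSAt p q) y x else pvG M y x := by
  have hlp : PySem.Str.len p = ((p.toList.length : Nat) : Int) := by simp
  have hlq : PySem.Str.len q = ((q.toList.length : Nat) : Int) := by simp
  intro fuel
  induction fuel with
  | zero =>
    intro yn xn M hf hyn hxn hS
    have hcond : ¬ ((yn : Int) ≤ PySem.Str.len p ∧ (xn : Int) ≤ PySem.Str.len q) := by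
      rw [hlp, hlq]
      omega
    rw [diag_walk, dif_neg hcond]
    refine ⟨hS, ?_⟩
    intro y hy x hx
    rw [if_neg (by omega)]
  | succ fuel ih =>
    intro yn xn M hf hyn hxn hS
    by_cases hcond : (yn : Int) ≤ PySem.Str.len p ∧ (xn : Int) ≤ PySem.Str.len q
    · have hynn : yn ≤ p.toList.length := by
        have := hcond.1; rw [hlp] at this; exact_mod_cast this
      have hxnn : xn ≤ q.toList.length := by
        have := hcond.2; rw [hlq] at this; exact_mod_cast this
      rw [diag_walk, dif_pos hcond]
      simp only []
      have hacc : pvCellF (pvSAt p q) (yn - 1) (xn - 1) +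
          (create_scoring_dict.get? (String.ofList
            [(PySem.Str.pyGet? p ((yn : Int) - 1)).getD 'A',
             (PySem.Str.pyGet? q ((xn : Int) - 1)).getD 'A'])).getD 0 =
          pvCellF (pvSAt p q) yn xn := by
        have ey : (yn : Int) - 1 = ((yn - 1 : Nat) : Int) := by omega
        have ex : (xn : Int) - 1 = ((xn - 1 : Nat) : Int) := by omega
        rw [ey, ex]
        have h1 : yn = (yn - 1) + 1 := by omega
        have h2 : xn = (xn - 1) + 1 := by omega
        conv_rhs => rw [h1, h2]
        rfl
      rw [hacc]
      have ey1 : (yn : Int) + 1 = ((yn + 1 : Nat) : Int) := by omega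
      have ex1 : (xn : Int) + 1 = ((xn + 1 : Nat) : Int) := by omega
      have hmat : PySem.List.pySetD M (yn : Int)
          (PySem.List.pySetD (PySem.List.pyGetD M (yn : Int) []) (xn : Int)
            (pvCellF (pvSAt p q) yn xn)) =
          pvSetG M yn xn (pvCellF (pvSAt p q) yn xn) := by
        rw [PySem.List.pySetD_natCast, PySem.List.pyGetD_natCast, PySem.List.pySetD_natCast, pvSetG]
      rw [ey1, ex1, hmat]
      obtain ⟨hS', hG'⟩ := ih (yn + 1) (xn + 1) (pvSetG M yn xn (pvCellF (pvSAt p q) yn xn))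
        (by omega) (by omega) (by omega)
        (pvShape_setG hS hynn xn (pvCellF (pvSAt p q) yn xn))
      simp only [Nat.add_sub_cancel] at hS' hG'
      refine ⟨hS', ?_⟩
      intro y hy x hx
      rw [hG' y hy x hx]
      by_cases hd : yn + 1 ≤ y ∧ xn + 1 ≤ x ∧ y - (yn + 1) = x - (xn + 1)
      · rw [if_pos hd, if_pos (by omega)]
      · rw [if_neg hd, pvG_setG hS hynn hxnn]
        by_cases he : y = yn ∧ x = xn
        · rw [if_pos he, if_pos (by omega), he.1, he.2]
        · rw [if_neg he, if_neg (by omega)]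
    · rw [diag_walk, dif_neg hcond]
      rw [hlp, hlq] at hcond
      refine ⟨hS, ?_⟩
      intro y hy x hx
      rw [if_neg (by omega)]

lemma pvWalkTop (p q : String) (k : Nat) (M : List (List Int))
    (hS : pvShape p.toList.length q.toList.length M) :
    pvShape p.toList.length q.toList.length
      (diag_walk p q create_scoring_dict 0 1 ((1 : Int) + (k : Int)) M) ∧
    ∀ y ≤ p.toList.length, ∀ x ≤ q.toList.length,
      pvG (diag_walk p q create_scoring_dict 0 1 ((1 : Int) + (k : Int)) M) y x =
        if 1 ≤ y ∧ 1 + k ≤ x ∧ y - 1 = x - (1 + k) then pvCellF (pvSAt p q) y x else pvG M y x := by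
  have spec := pvWalk_spec p q (p.toList.length + 1) 1 (1 + k) M (by omega) le_rfl (by omega) hS
  have h0 : (1 : Nat) - 1 = 0 := rfl
  rw [h0, pvCellF_zero_left] at spec
  push_cast at spec
  exact spec

lemma pvWalkLeft (p q : String) (k : Nat) (M : List (List Int))
    (hS : pvShape p.toList.length q.toList.length M) :
    pvShape p.toList.length q.toList.length
      (diag_walk p q create_scoring_dict 0 ((2 : Int) + (k : Int)) 1 M) ∧
    ∀ y ≤ p.toList.length, ∀ x ≤ q.toList.length,
      pvG (diag_walk p q create_scoring_dict 0 ((2 : Int) + (k : Int)) 1 M) y x =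
        if 2 + k ≤ y ∧ 1 ≤ x ∧ y - (2 + k) = x - 1 then pvCellF (pvSAt p q) y x else pvG M y x := by
  have spec := pvWalk_spec p q (p.toList.length + 1) (2 + k) 1 M (by omega) (by omega) le_rfl hS
  have h0 : (1 : Nat) - 1 = 0 := rfl
  have h1 : (2 + k : Nat) - 1 = 1 + k := by omega
  rw [h0, h1, pvCellF_zero_right] at spec
  push_cast at spec
  exact spec

lemma pvTops_spec (p q : String) :
    ∀ k, ∀ M, pvShape p.toList.length q.toList.length M →
      (∀ y ≤ p.toList.length, ∀ x ≤ q.toList.length, pvG M y x = 0) →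
      pvShape p.toList.length q.toList.length
        ((List.range k).foldl (fun (M : List (List Int)) (c : Nat) => diag_walk p q create_scoring_dict 0 1 ((1 : Int) + (c : Int)) M) M) ∧
      ∀ y ≤ p.toList.length, ∀ x ≤ q.toList.length,
        pvG ((List.range k).foldl (fun (M : List (List Int)) (c : Nat) => diag_walk p q create_scoring_dict 0 1 ((1 : Int) + (c : Int)) M) M) y x =
          if 1 ≤ y ∧ 1 ≤ x ∧ y ≤ x ∧ x - y < k then pvCellF (pvSAt p q) y x else 0 := by
  intro k
  induction k with
  | zero =>
    intro M hS hG
    refine ⟨by simpa using hS, ?_⟩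
    intro y hy x hx
    simp only [List.range_zero, List.foldl_nil]
    rw [hG y hy x hx, if_neg (by omega)]
  | succ k ih =>
    intro M hS hG
    obtain ⟨hSk, hGk⟩ := ih M hS hG
    rw [List.range_succ, List.foldl_append, List.foldl_cons, List.foldl_nil]
    obtain ⟨hS', hG'⟩ := pvWalkTop p q k _ hSk
    refine ⟨hS', ?_⟩
    intro y hy x hx
    rw [hG' y hy x hx]
    by_cases hd : 1 ≤ y ∧ 1 + k ≤ x ∧ y - 1 = x - (1 + k)
    · rw [if_pos hd, if_pos (by omega)]
    · rw [if_neg hd, hGk y hy x hx]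
      have hiff : (1 ≤ y ∧ 1 ≤ x ∧ y ≤ x ∧ x - y < k) ↔
          (1 ≤ y ∧ 1 ≤ x ∧ y ≤ x ∧ x - y < k + 1) := by omega
      simp only [hiff]

lemma pvLefts_spec (p q : String) :
    ∀ k, ∀ M, pvShape p.toList.length q.toList.length M →
      (∀ y ≤ p.toList.length, ∀ x ≤ q.toList.length,
        pvG M y x = if 1 ≤ y ∧ 1 ≤ x ∧ y ≤ x then pvCellF (pvSAt p q) y x else 0) →
      pvShape p.toList.length q.toList.length
        ((List.range k).foldl (fun (M : List (List Int)) (c : Nat) => diag_walk p q create_scoring_dict 0 ((2 : Int) + (c : Int)) 1 M) M) ∧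
      ∀ y ≤ p.toList.length, ∀ x ≤ q.toList.length,
        pvG ((List.range k).foldl (fun (M : List (List Int)) (c : Nat) => diag_walk p q create_scoring_dict 0 ((2 : Int) + (c : Int)) 1 M) M) y x =
          if 1 ≤ y ∧ 1 ≤ x ∧ (y ≤ x ∨ y - x ≤ k) then pvCellF (pvSAt p q) y x else 0 := by
  intro k
  induction k with
  | zero =>
    intro M hS hG
    refine ⟨by simpa using hS, ?_⟩
    intro y hy x hx
    simp only [List.range_zero, List.foldl_nil]
    rw [hG y hy x hx]
    have hiff : (1 ≤ y ∧ 1 ≤ x ∧ y ≤ x) ↔ (1 ≤ y ∧ 1 ≤ x ∧ (y ≤ x ∨ y - x ≤ 0)) := by omega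
    simp only [hiff]
  | succ k ih =>
    intro M hS hG
    obtain ⟨hSk, hGk⟩ := ih M hS hG
    rw [List.range_succ, List.foldl_append, List.foldl_cons, List.foldl_nil]
    obtain ⟨hS', hG'⟩ := pvWalkLeft p q k _ hSk
    refine ⟨hS', ?_⟩
    intro y hy x hx
    rw [hG' y hy x hx]
    by_cases hd : 2 + k ≤ y ∧ 1 ≤ x ∧ y - (2 + k) = x - 1
    · rw [if_pos hd, if_pos (by omega)]
    · rw [if_neg hd, hGk y hy x hx]
      have hiff : (1 ≤ y ∧ 1 ≤ x ∧ (y ≤ x ∨ y - x ≤ k)) ↔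
          (1 ≤ y ∧ 1 ≤ x ∧ (y ≤ x ∨ y - x ≤ k + 1)) := by omega
      simp only [hiff]

lemma portB_eq (p q : String) :
    align_strings_alt p q = pvMF (pvSAt p q) p.toList.length q.toList.length := by
  have hlp : PySem.Str.len p = ((p.toList.length : Nat) : Int) := by simp
  have hlq : PySem.Str.len q = ((q.toList.length : Nat) : Int) := by simp
  unfold align_strings_alt
  rw [hlp, hlq, pvEmpty_eq]
  rw [List.foldl_append]
  simp only [List.foldl_map, PySem.List.pyRange_one, add_sub_cancel_right, Int.toNat_natCast]
  have h2 : ((p.toList.length : Int) + 1 - 2).toNat = p.toList.length - 1 := by omega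
  rw [h2]
  obtain ⟨hS1, hG1⟩ := pvTops_spec p q q.toList.length
    (List.replicate (p.toList.length + 1) (List.replicate (q.toList.length + 1) (0 : Int)))
    (pvShape_M0 _ _) (fun y _ x _ => pvG_M0 _ _ y x)
  have hG1' : ∀ y ≤ p.toList.length, ∀ x ≤ q.toList.length,
      pvG ((List.range q.toList.length).foldl
        (fun (M : List (List Int)) (c : Nat) => diag_walk p q create_scoring_dict 0 1 ((1 : Int) + (c : Int)) M)
        (List.replicate (p.toList.length + 1) (List.replicate (q.toList.length + 1) (0 : Int)))) y x =
      if 1 ≤ y ∧ 1 ≤ x ∧ y ≤ x then pvCellF (pvSAt p q) y x else 0 := by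
    intro y hy x hx
    rw [hG1 y hy x hx]
    have hiff : (1 ≤ y ∧ 1 ≤ x ∧ y ≤ x ∧ x - y < q.toList.length) ↔
        (1 ≤ y ∧ 1 ≤ x ∧ y ≤ x) := by omega
    simp only [hiff]
  obtain ⟨hS2, hG2⟩ := pvLefts_spec p q (p.toList.length - 1) _ hS1 hG1'
  apply pvMF_eq_of hS2
  intro y hy x hx
  rw [hG2 y hy x hx]
  rcases Nat.eq_zero_or_pos y with hy0 | hy1
  · rw [hy0, pvCellF_zero_left, if_neg (by omega)]
  rcases Nat.eq_zero_or_pos x with hx0 | hx1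
  · rw [hx0, pvCellF_zero_right, if_neg (by omega)]
  rw [if_pos (by omega)]

-- ===== VERDICT (by name: the statement is the Claim_ definition above) =====
theorem align_strings_spec : Claim_equal_align_strings := by
  intro p q _dom _pre
  unfold Spec_align_strings
  rw [portA_eq, portB_eq]
  rcases pvOuterA_spec (pvSAt p q) p.toList.length q.toList.length q.toList.length le_rfl with ⟨hs, hG⟩
  apply pvMF_eq_of hs
  intro y hy x hx
  rw [hG y hy x hx, if_pos hx]
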